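-- pv_equiv track=rewrite | github.com/lilatomic/python-keyutils | test/crypt_utils.py | parse_openssl_text
-- ===== SOURCE A (Python) =====
-- def read_pem_object(head: str, it):
--     """Read a PEM object"""
--     key_name = head[5:-5]
--     if key_name.startswith("BEGIN "):
--         key_name = key_name[len("BEGIN "):]
--     key_data = ""
--     for line in it:
--         if line.startswith("-----"):  # trailer
--             return key_name, key_data
--         else:
--             key_data += line.strip()
--     raise StopIteration(f"Reached end of key block but did not find trailer. head is {key_name}")
--
-- def parse_openssl_text(ls):
--     keys = []
--     result = {}
--
--     current_field = None
--     current_data = ""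
--
--     lines = iter(ls)
--     for line in lines:
--         if line.startswith("-----"):
--             # line begins a key
--             key_name, key_data = read_pem_object(line, lines)
--             keys.append((key_name, key_data,))
--
--         elif not line.startswith(' '):
--             line = line.strip()
--             # This line represents a field name
--             field_name_end = line.find(":")
--             current_field = line[:field_name_end]
--
--             if not line.endswith(":"):  # data is inline
--                 current_data = line[field_name_end + 1:].strip()
--             else:
--                 current_data = ""  # Reset the data list for the new field
--
--         elif current_field is not None and line:
--             # This line contains hexadecimal data
--             current_data += (line.strip())
--
--         # Store the data for the current field
--         if current_field is not None:
--             result[current_field] = current_data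
--
--     return keys, result
-- ===== SOURCE B (Python) =====
-- def parse_openssl_text(ls):
--     keys = []
--     result = {}
--     current_field = None
--     current_data = ""
--     pem = None  # (key_name, key_data) while inside a PEM block
--     for line in ls:
--         if pem is not None:
--             key_name, key_data = pem
--             if line.startswith("-----"):  # trailer: finish the block
--                 keys.append((key_name, key_data))
--                 pem = None
--                 if current_field is not None:
--                     result[current_field] = current_data
--             else:
--                 pem = (key_name, key_data + line.strip())
--         elif line.startswith("-----"):  # header: open a block
--             key_name = line[5:-5]
--             if key_name.startswith("BEGIN "):
--                 key_name = key_name[len("BEGIN "):]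
--             pem = (key_name, "")
--         else:
--             if not line.startswith(' '):
--                 line = line.strip()
--                 i = line.find(":")
--                 current_field = line[:i]
--                 if not line.endswith(":"):
--                     current_data = line[i + 1:].strip()
--                 else:
--                     current_data = ""
--             elif current_field is not None and line:
--                 current_data += line.strip()
--             if current_field is not None:
--                 result[current_field] = current_data
--     if pem is not None:
--         raise StopIteration(f"Reached end of key block but did not find trailer. head is {pem[0]}")
--     return keys, result
-- ===== Notes on version B (the rewrite author's own statement) =====
-- stated objective: simpler
-- what changed: Replaced the nested read_pem_object helper that consumes lines from a shared iterator with one flat for-loop over the lines carrying an explicit pem state (None, or the (key_name,key_data) accumulated so far), finishing a PEM block when its trailer line is seen.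
import Mathlib
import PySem

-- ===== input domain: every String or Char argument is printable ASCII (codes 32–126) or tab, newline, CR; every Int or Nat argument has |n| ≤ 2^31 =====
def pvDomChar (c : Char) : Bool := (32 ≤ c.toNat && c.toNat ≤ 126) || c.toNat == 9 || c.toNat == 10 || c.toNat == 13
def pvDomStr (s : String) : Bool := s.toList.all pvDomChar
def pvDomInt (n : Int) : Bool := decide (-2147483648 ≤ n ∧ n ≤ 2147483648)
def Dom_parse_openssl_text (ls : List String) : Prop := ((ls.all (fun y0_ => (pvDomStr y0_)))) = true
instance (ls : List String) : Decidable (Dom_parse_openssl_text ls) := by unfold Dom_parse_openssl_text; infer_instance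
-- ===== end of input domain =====

-- B replaces A's nested read_pem_object helper (which pulls from a shared iterator)
-- by one flat loop carrying an explicit Option-valued PEM state: simpler decomposition, same cost.

-- ===== PORT A =====
-- the `for line in it:` loop inside read_pem_object; none = fell off the end (the raise)
def readPemLoop (key_name key_data : String) (it : List String) :
    Option ((String × String) × List String) :=
  match it with
  | [] => none
  | line :: rest =>
    if PySem.Str.startswith line "-----" then some ((key_name, key_data), rest)
    else readPemLoop key_name (key_data ++ PySem.Str.strip line) rest

def read_pem_object (head : String) (it : List String) :
    Option ((String × String) × List String) :=
  let kn0 := PySem.Str.slice head (some 5) (some (-5))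
  let key_name := if PySem.Str.startswith kn0 "BEGIN " then PySem.Str.slice kn0 (some 6) none else kn0
  readPemLoop key_name "" it

-- termination helper for parseALoop (the port cites it by name in decreasing_by)
theorem readPemLoop_length {kn kd : String} {it : List String} {p : String × String}
    {rest : List String} (h : readPemLoop kn kd it = some (p, rest)) :
    rest.length < it.length := by
  induction it generalizing kd with
  | nil => simp [readPemLoop] at h
  | cons line t ih =>
    unfold readPemLoop at h
    split at h
    · cases h; simp
    · exact Nat.lt_trans (ih h) (by simp)

theorem read_pem_object_length {head : String} {it : List String} {p : String × String}
    {rest : List String} (h : read_pem_object head it = some (p, rest)) :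
    rest.length < it.length := by
  unfold read_pem_object at h
  exact readPemLoop_length h

-- the main `for line in lines:` loop of A; none = StopIteration propagated
def parseALoop (lines : List String) (keys : List (String × String))
    (result : PySem.Dict String String) (cf : Option String) (cd : String) :
    Option ((List (String × String)) × PySem.Dict String String) :=
  match lines with
  | [] => some (keys, result)
  | line :: rest =>
    if PySem.Str.startswith line "-----" then
      match h : read_pem_object line rest with
      | none => none
      | some ((kn, kd), rest') =>
        let keys' := keys ++ [(kn, kd)]
        let result' := match cf with | some f => result.insert f cd | none => result
        parseALoop rest' keys' result' cf cd
    else if !(PySem.Str.startswith line " ") then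
      let line' := PySem.Str.strip line
      let fne := PySem.Str.find line' ":"
      let cf' := some (PySem.Str.slice line' none (some fne))
      let cd' := if !(PySem.Str.endswith line' ":")
                 then PySem.Str.strip (PySem.Str.slice line' (some (fne + 1)) none)
                 else ""
      let result' := result.insert (PySem.Str.slice line' none (some fne)) cd'
      parseALoop rest keys result' cf' cd'
    else
      let cd' := if cf.isSome && !(line == "") then cd ++ PySem.Str.strip line else cd
      let result' := match cf with | some f => result.insert f cd' | none => result
      parseALoop rest keys result' cf cd'
termination_by lines.length
decreasing_by
  · exact Nat.lt_of_lt_of_le (read_pem_object_length h) (by simp)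
  · simp
  · simp

def parse_openssl_text (ls : List String) : (List (String × String)) × (List (String × String)) :=
  match parseALoop ls [] PySem.Dict.empty none "" with
  | some (k, r) => (k, r.items)
  | none => ([], [])   -- unreachable under Pre_ (Python A raises StopIteration here)

-- ===== PORT B =====
-- one flat loop; pem = some (key_name, key_data) while inside a PEM block
def parseBLoop (lines : List String) (keys : List (String × String))
    (result : PySem.Dict String String) (cf : Option String) (cd : String)
    (pem : Option (String × String)) :
    Option ((List (String × String)) × PySem.Dict String String) :=
  match lines with
  | [] => match pem with | some _ => none | none => some (keys, result)
  | line :: rest =>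
    match pem with
    | some (kn, kd) =>
      if PySem.Str.startswith line "-----" then
        let result' := match cf with | some f => result.insert f cd | none => result
        parseBLoop rest (keys ++ [(kn, kd)]) result' cf cd none
      else
        parseBLoop rest keys result cf cd (some (kn, kd ++ PySem.Str.strip line))
    | none =>
      if PySem.Str.startswith line "-----" then
        let kn0 := PySem.Str.slice line (some 5) (some (-5))
        let kn := if PySem.Str.startswith kn0 "BEGIN " then PySem.Str.slice kn0 (some 6) none else kn0
        parseBLoop rest keys result cf cd (some (kn, ""))
      else if !(PySem.Str.startswith line " ") then
        let line' := PySem.Str.strip line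
        let fne := PySem.Str.find line' ":"
        let cf' := some (PySem.Str.slice line' none (some fne))
        let cd' := if !(PySem.Str.endswith line' ":")
                   then PySem.Str.strip (PySem.Str.slice line' (some (fne + 1)) none)
                   else ""
        let result' := result.insert (PySem.Str.slice line' none (some fne)) cd'
        parseBLoop rest keys result' cf' cd' none
      else
        let cd' := if cf.isSome && !(line == "") then cd ++ PySem.Str.strip line else cd
        let result' := match cf with | some f => result.insert f cd' | none => result
        parseBLoop rest keys result' cf cd' none

def parse_openssl_text_alt (ls : List String) : (List (String × String)) × (List (String × String)) :=
  match parseBLoop ls [] PySem.Dict.empty none "" none with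
  | some (k, r) => (k, r.items)
  | none => ([], [])   -- unreachable under Pre_ (Python B raises StopIteration here)

-- ===== PRECONDITION & SPEC =====
-- Pre_ excludes exactly the inputs with an unterminated PEM block (an odd number of
-- "-----"-prefixed lines), on which Python A raises StopIteration (and B does too).
def Pre_parse_openssl_text (ls : List String) : Prop :=
  (ls.countP (fun l => PySem.Str.startswith l "-----")) % 2 = 0
instance (ls : List String) : Decidable (Pre_parse_openssl_text ls) := by
  unfold Pre_parse_openssl_text; infer_instance

def pvWitness_parse_openssl_text : List String :=
  ["Modulus:", "    00ab:cdef", "-----BEGIN KEY-----", "QUJD", "-----END KEY-----"]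

def Spec_parse_openssl_text (ls : List String) (out : (List (String × String)) × (List (String × String))) : Prop := out = parse_openssl_text_alt ls
instance (ls : List String) (out : (List (String × String)) × (List (String × String))) : Decidable (Spec_parse_openssl_text ls out) := by unfold Spec_parse_openssl_text; infer_instance

-- ===== CLAIM (what is proved, stated in full; the proofs are below) =====
def Claim_equal_parse_openssl_text : Prop := ∀ (ls : List String), Dom_parse_openssl_text ls → Pre_parse_openssl_text ls → Spec_parse_openssl_text ls (parse_openssl_text ls)

-- ===== LEMMAS AND PROOFS =====

-- B's loop run with pem = some state equals reading the whole PEM block with A's readPemLoop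
theorem parseBLoop_pem (it : List String) (keys : List (String × String))
    (result : PySem.Dict String String) (cf : Option String) (cd kn kd : String) :
    parseBLoop it keys result cf cd (some (kn, kd)) =
      match readPemLoop kn kd it with
      | none => none
      | some ((n, d), rest) =>
          parseBLoop rest (keys ++ [(n, d)])
            (match cf with | some f => result.insert f cd | none => result) cf cd none := by
  induction it generalizing kd with
  | nil => simp [parseBLoop, readPemLoop]
  | cons line rest ih =>
    by_cases h : PySem.Str.startswith line "-----"
    · conv_lhs => rw [parseBLoop.eq_def]
      conv_rhs => rw [readPemLoop.eq_def]
      simp only [h, if_true]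
    · conv_lhs => rw [parseBLoop.eq_def]
      conv_rhs => rw [readPemLoop.eq_def]
      simp only [h, if_false, Bool.false_eq_true]
      exact ih _

theorem loops_eq (n : Nat) : ∀ (lines : List String), lines.length ≤ n →
    ∀ (keys : List (String × String)) (result : PySem.Dict String String)
      (cf : Option String) (cd : String),
    parseALoop lines keys result cf cd = parseBLoop lines keys result cf cd none := by
  induction n with
  | zero =>
    intro lines hl keys result cf cd
    have : lines = [] := List.length_eq_zero_iff.mp (Nat.le_zero.mp hl)
    subst this; simp [parseALoop, parseBLoop]
  | succ m ih =>
    intro lines hl keys result cf cd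
    match lines with
    | [] => simp [parseALoop, parseBLoop]
    | line :: rest =>
      have hr : rest.length ≤ m := by simpa using Nat.le_of_succ_le_succ hl
      conv_lhs => rw [parseALoop.eq_def]
      conv_rhs => rw [parseBLoop.eq_def]
      by_cases h : PySem.Str.startswith line "-----"
      · simp only [h, if_true]
        rw [parseBLoop_pem]
        unfold read_pem_object
        cases hp : readPemLoop
            (if PySem.Str.startswith (PySem.Str.slice line (some 5) (some (-5))) "BEGIN "
             then PySem.Str.slice (PySem.Str.slice line (some 5) (some (-5))) (some 6) none
             else PySem.Str.slice line (some 5) (some (-5))) "" rest with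
        | none => simp
        | some p =>
          obtain ⟨⟨kn, kd⟩, rest'⟩ := p
          have hr' : rest'.length ≤ m :=
            Nat.le_of_lt (Nat.lt_of_lt_of_le (readPemLoop_length hp) hr)
          exact ih rest' hr' _ _ _ _
      · simp only [h, if_false, Bool.false_eq_true]
        by_cases h2 : PySem.Str.startswith line " "
        · simp only [h2, Bool.not_true, if_false, Bool.false_eq_true]
          exact ih rest hr _ _ _ _
        · simp only [h2, Bool.not_false, if_true]
          exact ih rest hr _ _ _ _

-- ===== VERDICT (by name: the statement is the Claim_ definition above) =====
theorem parse_openssl_text_spec : Claim_equal_parse_openssl_text := by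
  intro ls _ _
  unfold Spec_parse_openssl_text parse_openssl_text parse_openssl_text_alt
  rw [loops_eq ls.length ls le_rfl]
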